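-- pv_equiv track=rewrite | github.com/PeytonAndras/ais_project | hybrid_maritime_ais/hybrid_maritime_ais.py | _nrzi_encode
-- ===== SOURCE A (Python) =====
-- from typing import Optional, Dict, List, Tuple
--
-- def _nrzi_encode(bits: List[int]) -> List[int]:
--     """Standard NRZI encoding - transition for 0, no transition for 1"""
--     if not bits:
--         return []
--
--     encoded = []
--     current = 1  # Start with 1
--
--     for bit in bits:
--         if bit == 0:
--             current = 1 - current  # Transition
--         encoded.append(current)
--
--     return encoded
-- ===== SOURCE B (Python) =====
-- def _nrzi_encode(bits):
--     """NRZI closed form: output i is the level 1 - (number of zero bits in bits[:i+1]) % 2."""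
--     return [1 - bits[:i + 1].count(0) % 2 for i in range(len(bits))]
-- ===== Notes on version B (the rewrite author's own statement) =====
-- stated objective: simpler
-- what changed: Replaces the stateful level-toggling loop by a stateless per-index closed form: each output is computed directly as 1 - (zeros in the prefix bits[:i+1]) % 2, a one-line comprehension with no running state.
import Mathlib
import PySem

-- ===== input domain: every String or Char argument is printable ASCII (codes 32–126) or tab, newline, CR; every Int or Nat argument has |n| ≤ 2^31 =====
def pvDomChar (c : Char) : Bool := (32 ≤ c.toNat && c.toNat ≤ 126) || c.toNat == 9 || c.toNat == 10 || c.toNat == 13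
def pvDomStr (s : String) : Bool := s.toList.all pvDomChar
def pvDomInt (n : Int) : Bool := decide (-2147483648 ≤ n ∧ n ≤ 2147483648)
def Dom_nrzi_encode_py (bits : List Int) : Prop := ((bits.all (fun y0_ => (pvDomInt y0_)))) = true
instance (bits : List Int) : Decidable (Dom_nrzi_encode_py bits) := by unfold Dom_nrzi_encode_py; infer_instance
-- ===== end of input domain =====

-- B replaces A's stateful level-toggling loop by a stateless per-index closed form
-- (output i = 1 - (zeros in bits[:i+1]) % 2); objective: simpler (one line, no running state),
-- at quadratic instead of linear cost.

-- ===== PORT A =====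
-- A: guard on empty, then one loop toggling `current` on each zero bit and appending it.
def nrziStepA (st : List Int × Int) (bit : Int) : List Int × Int :=
  let current := if bit = 0 then 1 - st.2 else st.2
  (st.1 ++ [current], current)

def nrzi_encode_py (bits : List Int) : List Int :=
  if bits = [] then []
  else (bits.foldl nrziStepA ([], 1)).1

-- ===== PORT B =====
-- B: one comprehension over range(len(bits)); element i is 1 - bits[:i+1].count(0) % 2.
def nrzi_encode_py_alt (bits : List Int) : List Int :=
  (PySem.List.pyRange 0 (bits.length : Int) 1).map
    (fun i => 1 - PySem.Int.mod ((PySem.List.slice bits none (some (i + 1))).count 0 : Int) 2)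

-- ===== PRECONDITION & SPEC =====
def Spec_nrzi_encode_py (bits : List Int) (out : List Int) : Prop := out = nrzi_encode_py_alt bits
instance (bits : List Int) (out : List Int) : Decidable (Spec_nrzi_encode_py bits out) := by unfold Spec_nrzi_encode_py; infer_instance

-- ===== CLAIM (what is proved, stated in full; the proofs are below) =====
def Claim_equal_nrzi_encode_py : Prop := ∀ (bits : List Int), Dom_nrzi_encode_py bits → Spec_nrzi_encode_py bits (nrzi_encode_py bits)

-- ===== LEMMAS AND PROOFS =====

-- the values A's loop appends, as a structural recursion on the remaining bits
def nrziGo : List Int → Int → List Int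
  | [], _ => []
  | b :: bs, cur =>
    let cur' := if b = 0 then 1 - cur else cur
    cur' :: nrziGo bs cur'

theorem nrzi_foldA_eq (bits : List Int) :
    ∀ (acc : List Int) (cur : Int),
      (bits.foldl nrziStepA (acc, cur)).1 = acc ++ nrziGo bits cur := by
  induction bits with
  | nil => intro acc cur; simp [nrziGo]
  | cons b bs ih =>
    intro acc cur
    simp only [List.foldl_cons, nrziStepA, nrziGo]
    rw [ih]
    simp

theorem nrziGo_closed (bits : List Int) :
    ∀ (z : ℕ),
      nrziGo bits (1 - ((z : Int) % 2)) =
        (List.range bits.length).map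
          (fun k => 1 - (((z + (bits.take (k + 1)).count 0 : ℕ) : Int) % 2)) := by
  induction bits with
  | nil => intro z; simp [nrziGo]
  | cons b bs ih =>
    intro z
    simp only [nrziGo, List.length_cons, List.range_succ_eq_map, List.map_cons, List.map_map]
    by_cases hb : b = 0
    · have hcur : (1 : Int) - (1 - (z : Int) % 2) = 1 - (((z + 1 : ℕ) : Int) % 2) := by
        push_cast; omega
      rw [if_pos hb, hcur, ih (z + 1)]
      congr 1
      · simp [hb]
      · apply List.map_congr_left
        intro k _
        simp [hb, Function.comp]
        ring_nf
    · rw [if_neg hb, ih z]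
      congr 1
      · simp [hb]
      · apply List.map_congr_left
        intro k _
        simp [hb, Function.comp]

-- ===== VERDICT (by name: the statement is the Claim_ definition above) =====
theorem nrzi_encode_py_spec : Claim_equal_nrzi_encode_py := by
  intro bits _
  unfold Spec_nrzi_encode_py nrzi_encode_py nrzi_encode_py_alt
  by_cases hb : bits = []
  · simp [hb]
  · rw [if_neg hb, nrzi_foldA_eq bits [] 1, List.nil_append]
    have hgo := nrziGo_closed bits 0
    norm_num at hgo
    rw [hgo, PySem.List.pyRange_zero_natCast]
    rw [List.map_map]
    apply List.map_congr_left
    intro k hk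
    have hc : ((k : Int) + 1) = ((k + 1 : ℕ) : Int) := by push_cast; ring
    simp only [Function.comp, hc, PySem.List.slice_to_natCast]
    rw [PySem.Int.mod_eq_emod_of_pos (by norm_num)]
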